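-- pv_equiv track=rewrite | github.com/tommydo89/CTCI | 5. Bit Manipulation/nextNumber.py | shiftLarge
-- ===== SOURCE A (Python) =====
-- def shiftLarge(num, mask):
-- 	shiftedbits = num & mask # mask is a mask for the bits we want to shift. shiftedbits is a copy of those bits
-- 	while shiftedbits != 0: # repeatedly shifts right until a 1 is cut out
-- 		if shiftedbits & 1 == 1:
-- 			shiftedbits = shiftedbits >> 1
-- 			break
-- 		shiftedbits = shiftedbits >> 1
-- 	num = num & ~(mask) # clears the bits that we were shifting
-- 	num = num | shiftedbits # copies over the newly shifted bits
-- 	return num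
-- ===== SOURCE B (Python) =====
-- def shiftLarge(num, mask):
--     shiftedbits = num & mask
--     # (b & -b) isolates the lowest set bit; its bit_length is exactly the
--     # number of right-shifts A's loop performs (0 when b == 0).
--     s = (shiftedbits & -shiftedbits).bit_length()
--     return (num & ~mask) | (shiftedbits >> s)
-- ===== Notes on version B (the rewrite author's own statement) =====
-- stated objective: simpler
-- what changed: Replaces A's shift-one-bit-at-a-time while loop with a single closed-form shift count (shiftedbits & -shiftedbits).bit_length(), which equals the number of shifts A performs (0 when the masked bits are 0), so B is loop-free.
import Mathlib
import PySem

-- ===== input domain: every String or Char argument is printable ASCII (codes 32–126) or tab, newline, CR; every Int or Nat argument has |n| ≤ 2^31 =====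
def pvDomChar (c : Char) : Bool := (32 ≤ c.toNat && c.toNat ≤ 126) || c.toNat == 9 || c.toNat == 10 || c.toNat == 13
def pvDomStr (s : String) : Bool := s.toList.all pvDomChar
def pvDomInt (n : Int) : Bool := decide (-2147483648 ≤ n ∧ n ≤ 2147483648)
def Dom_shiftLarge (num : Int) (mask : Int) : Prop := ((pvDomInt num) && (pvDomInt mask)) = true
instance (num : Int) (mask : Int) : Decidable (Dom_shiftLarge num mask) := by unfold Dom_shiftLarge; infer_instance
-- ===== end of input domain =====

-- B replaces A's shift-until-a-1-is-cut-out loop by one closed-form shift count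
-- ((b & -b).bit_length()), i.e. a loop-free computation (objective: simpler).

-- ===== PORT A =====
-- A's while loop: shift right until the first 1 bit has been shifted out (or the value is 0).
def shiftLargeLoop (shiftedbits : Int) : Int :=
  if _h : shiftedbits ≠ 0 then
    if PySem.Int.band shiftedbits 1 == 1 then shiftedbits >>> (1 : Nat)
    else shiftLargeLoop (shiftedbits >>> (1 : Nat))
  else shiftedbits
termination_by shiftedbits.natAbs
decreasing_by
  rename_i h2
  rw [PySem.Int.band_one, PySem.Int.mod_eq_emod_of_pos (by omega)] at h2
  simp only [beq_iff_eq] at h2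
  rw [Int.shiftRight_eq_div_pow]
  omega

def shiftLarge (num : Int) (mask : Int) : Int :=
  let shiftedbits := PySem.Int.band num mask
  let shiftedbits := shiftLargeLoop shiftedbits
  let num := PySem.Int.band num (Int.not mask)
  let num := PySem.Int.bor num shiftedbits
  num

-- ===== PORT B =====
def shiftLarge_alt (num : Int) (mask : Int) : Int :=
  let shiftedbits := PySem.Int.band num mask
  let s := PySem.Int.bitLength (PySem.Int.band shiftedbits (-shiftedbits))
  PySem.Int.bor (PySem.Int.band num (Int.not mask)) (shiftedbits >>> s)

-- ===== PRECONDITION & SPEC =====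
def Spec_shiftLarge (num : Int) (mask : Int) (out : Int) : Prop := out = shiftLarge_alt num mask
instance (num : Int) (mask : Int) (out : Int) : Decidable (Spec_shiftLarge num mask out) := by unfold Spec_shiftLarge; infer_instance

-- ===== CLAIM (what is proved, stated in full; the proofs are below) =====
def Claim_equal_shiftLarge : Prop := ∀ (num : Int) (mask : Int), Dom_shiftLarge num mask → Spec_shiftLarge num mask (shiftLarge num mask)

-- ===== LEMMAS AND PROOFS =====

-- lowbit n = the lowest set bit of n (0 for n = 0): n - (n &&& (n-1)) clears nothing but that bit.
def lowbit (n : Nat) : Nat := n - (n &&& (n - 1))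

theorem and_pred_odd {n : Nat} (h : n % 2 = 1) : n &&& (n - 1) = n - 1 := by
  apply Nat.eq_of_testBit_eq
  intro i
  cases i with
  | zero => simp [Nat.testBit_zero]; omega
  | succ i =>
      rw [Nat.testBit_and, Nat.testBit_succ, Nat.testBit_succ]
      have : n / 2 = (n - 1) / 2 := by omega
      rw [this, Bool.and_self]

theorem and_pred_even {m : Nat} (h : 0 < m) : (2 * m) &&& (2 * m - 1) = 2 * (m &&& (m - 1)) := by
  apply Nat.eq_of_testBit_eq
  intro i
  cases i with
  | zero => simp [Nat.testBit_zero]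
  | succ i =>
      rw [Nat.testBit_and, Nat.testBit_succ, Nat.testBit_succ, Nat.testBit_succ]
      have h1 : 2 * m / 2 = m := by omega
      have h2 : (2 * m - 1) / 2 = m - 1 := by omega
      have h3 : 2 * (m &&& (m - 1)) / 2 = m &&& (m - 1) := by omega
      rw [h1, h2, h3, Nat.testBit_and]

theorem lowbit_pos : ∀ n : Nat, 0 < n → 0 < lowbit n := by
  intro n
  induction n using Nat.strong_induction_on with
  | _ n ih =>
    intro hn
    unfold lowbit
    rcases Nat.even_or_odd n with he | ho
    · obtain ⟨m, hm⟩ := he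
      have hm' : n = 2 * m := by omega
      have hmpos : 0 < m := by omega
      rw [hm', and_pred_even hmpos]
      have := ih m (by omega) hmpos
      have hle : m &&& (m - 1) ≤ m := Nat.and_le_left
      unfold lowbit at this
      omega
    · rw [and_pred_odd (Nat.odd_iff.mp ho)]
      omega

theorem lowbit_even {n : Nat} (h : 0 < n) (he : n % 2 = 0) :
    lowbit n = 2 * lowbit (n / 2) := by
  obtain ⟨m, hm⟩ : ∃ m, n = 2 * m := ⟨n / 2, by omega⟩
  subst hm
  have h2 : 2 * m / 2 = m := by omega
  unfold lowbit
  rw [h2, and_pred_even (by omega)]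
  have hle : m &&& (m - 1) ≤ m := Nat.and_le_left
  omega

-- band s (-s) is the lowest set bit of |s|, for every sign of s.
theorem band_neg_self (s : Int) : PySem.Int.band s (-s) = (lowbit s.natAbs : Int) := by
  rcases lt_trichotomy s 0 with hs | hs | hs
  · rw [PySem.Int.band]
    rw [if_neg (by omega), if_pos (by omega)]
    have h1 : (-s).toNat = s.natAbs := by omega
    have h2 : (-s - 1).toNat = s.natAbs - 1 := by omega
    rw [h1, h2]; rfl
  · subst hs; rfl
  · rw [PySem.Int.band]
    rw [if_pos (by omega), if_neg (by omega)]
    have h1 : s.toNat = s.natAbs := by omega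
    have h2 : (-(-s) - 1).toNat = s.natAbs - 1 := by omega
    rw [h1, h2]; rfl

theorem loop_eq (s : Int) :
    shiftLargeLoop s = s >>> PySem.Int.bitLength (PySem.Int.band s (-s)) := by
  generalize hgen : s.natAbs = n
  induction n using Nat.strong_induction_on generalizing s with
  | _ n ih =>
    by_cases h0 : s = 0
    · subst h0; rw [shiftLargeLoop]; decide
    · rw [band_neg_self]
      have hmod : s % 2 = 0 ∨ s % 2 = 1 := by omega
      by_cases hodd : s % 2 = 1
      · -- odd: loop breaks after a single shift; lowbit = 1, bit_length 1 = 1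
        have hc : (PySem.Int.band s 1 == 1) = true := by
          rw [PySem.Int.band_one, PySem.Int.mod_eq_emod_of_pos (by omega)]
          simp [hodd]
        rw [shiftLargeLoop, dif_pos h0, if_pos hc]
        have hn1 : s.natAbs % 2 = 1 := by omega
        have hl1 : lowbit s.natAbs = 1 := by
          unfold lowbit; rw [and_pred_odd hn1]; omega
        have hb1 : PySem.Int.bitLength ((lowbit s.natAbs : Nat) : Int) = 1 := by
          rw [hl1]; decide
        rw [hb1]
      · -- even: one shift, then the induction hypothesis
        have heven : s % 2 = 0 := by omega
        have hc : (PySem.Int.band s 1 == 1) = false := by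
          rw [PySem.Int.band_one, PySem.Int.mod_eq_emod_of_pos (by omega)]
          simp [heven]
        rw [shiftLargeLoop, dif_pos h0, if_neg (by simp [hc])]
        have hdiv : s >>> (1 : Nat) = s / 2 := by
          rw [Int.shiftRight_eq_div_pow]; norm_num
        have habs : (s >>> (1 : Nat)).natAbs = s.natAbs / 2 := by rw [hdiv]; omega
        have hlt : s.natAbs / 2 < n := by omega
        rw [ih _ hlt _ habs, band_neg_self, habs]
        have hnpos : 0 < s.natAbs := by omega
        have hne : s.natAbs % 2 = 0 := by omega
        have hlow : lowbit s.natAbs = 2 * lowbit (s.natAbs / 2) := lowbit_even hnpos hne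
        have hpos2 : 0 < lowbit (s.natAbs / 2) := lowbit_pos _ (by omega)
        have hbl : PySem.Int.bitLength (lowbit s.natAbs : Int)
            = PySem.Int.bitLength (lowbit (s.natAbs / 2) : Int) + 1 := by
          rw [PySem.Int.bitLength_natCast (by omega)]
          congr 2
          omega
        rw [hbl, Nat.add_comm, Int.shiftRight_add]

-- ===== VERDICT (by name: the statement is the Claim_ definition above) =====
theorem shiftLarge_spec : Claim_equal_shiftLarge := by
  intro num mask _
  unfold Spec_shiftLarge
  simp only [shiftLarge, shiftLarge_alt, loop_eq]
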